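-- pv_equiv track=rewrite | github.com/Misssilence/some-algorithm | test/41-50.py | get_d_list
-- ===== SOURCE A (Python) =====
-- def get_d_list(list, d, tmp=None):
--     if tmp == None:
--         tmp = []
--     if len(list) <= d:
--         return tmp
--     elem1 = list[0]
--     elem2 = list[d]
--     list.pop(0)
--     tmp.append((elem1, elem2))
--     return get_d_list(list, d, tmp)
-- ===== SOURCE B (Python) =====
-- def get_d_list(list, d, tmp=None):
--     # Index-loop version. Mutates tmp (append) like A; equivalence is about
--     # the return value only (A also empties the input list, B leaves it intact).
--     tmp = [] if tmp is None else tmp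
--     for i in range(len(list) - d):
--         tmp.append((list[i], list[i + d]))
--     return tmp
-- ===== Notes on version B (the rewrite author's own statement) =====
-- stated objective: faster
-- what changed: Replaces A's pop(0)-and-recurse loop by a single forward index loop appending (list[i], list[i+d]); no list mutation, no quadratic pop shifting.
import Mathlib
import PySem

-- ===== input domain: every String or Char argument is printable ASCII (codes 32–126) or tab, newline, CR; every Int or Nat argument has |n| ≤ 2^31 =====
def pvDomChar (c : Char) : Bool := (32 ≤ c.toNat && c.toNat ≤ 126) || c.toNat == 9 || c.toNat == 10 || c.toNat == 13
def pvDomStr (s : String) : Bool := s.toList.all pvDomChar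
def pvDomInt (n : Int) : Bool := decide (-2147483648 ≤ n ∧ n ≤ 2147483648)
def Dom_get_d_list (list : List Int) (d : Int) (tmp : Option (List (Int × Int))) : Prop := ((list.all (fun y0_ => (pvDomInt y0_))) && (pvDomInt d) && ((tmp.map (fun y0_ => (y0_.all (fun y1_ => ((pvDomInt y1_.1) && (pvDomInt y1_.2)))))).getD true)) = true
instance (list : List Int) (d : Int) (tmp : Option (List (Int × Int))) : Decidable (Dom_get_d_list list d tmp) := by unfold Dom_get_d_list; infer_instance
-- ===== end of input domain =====

-- B replaces A's pop-and-recurse loop by one forward index loop; equivalence is about the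
-- RETURN value only (A empties the argument list down to d elements, B leaves it intact).

-- ===== PORT A =====
-- A's tail recursion: pop the head and append (list[0], list[d]) while len(list) > d.
def getARec : List Int → Int → List (Int × Int) → List (Int × Int)
  | lst, d, tmp =>
    if ((lst.length : Int)) ≤ d then tmp
    else
      match lst with
      | [] => tmp            -- Python: list[0] raises IndexError here (only reachable for d < 0)
      | e1 :: rest =>
        match PySem.List.pyGet? (e1 :: rest) d with
        | some e2 => getARec rest d (tmp ++ [(e1, e2)])
        | none => tmp        -- Python: list[d] raises IndexError (only reachable for d < 0)

def get_d_list (list : List Int) (d : Int) (tmp : Option (List (Int × Int))) : List (Int × Int) :=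
  getARec list d (tmp.getD [])

-- ===== PORT B =====
-- Source B: tmp = [] if tmp is None else tmp; for i in range(len(list)-d): tmp.append((list[i], list[i+d]))
def get_d_list_alt (list : List Int) (d : Int) (tmp : Option (List (Int × Int))) : List (Int × Int) :=
  (PySem.List.pyRange 0 ((list.length : Int) - d) 1).foldl
    (fun t i => t ++ [(PySem.List.pyGetD list i 0, PySem.List.pyGetD list (i + d) 0)])
    (tmp.getD [])

-- ===== PRECONDITION & SPEC =====
-- Pre_ excludes d < 0: there the Python A always raises IndexError (it pops the list empty
-- and reads list[0], or reads list[d] out of range), and B raises IndexError on list[i] too.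
def Pre_get_d_list (list : List Int) (d : Int) (tmp : Option (List (Int × Int))) : Prop := 0 ≤ d
instance (list : List Int) (d : Int) (tmp : Option (List (Int × Int))) : Decidable (Pre_get_d_list list d tmp) := by unfold Pre_get_d_list; infer_instance
def pvWitness_get_d_list : List Int × Int × (Option (List (Int × Int))) := ([1, 2, 3, 4], 2, none)

def Spec_get_d_list (list : List Int) (d : Int) (tmp : Option (List (Int × Int))) (out : List (Int × Int)) : Prop := out = get_d_list_alt list d tmp
instance (list : List Int) (d : Int) (tmp : Option (List (Int × Int))) (out : List (Int × Int)) : Decidable (Spec_get_d_list list d tmp out) := by unfold Spec_get_d_list; infer_instance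

-- ===== CLAIM =====
def Claim_equal_get_d_list : Prop := ∀ (list : List Int) (d : Int) (tmp : Option (List (Int × Int))), Dom_get_d_list list d tmp → Pre_get_d_list list d tmp → Spec_get_d_list list d tmp (get_d_list list d tmp)

-- ===== LEMMAS AND PROOFS =====
-- A's recursion computes tmp ++ zip(list, drop d list) when 0 ≤ d.
lemma getARec_eq (d : Int) (hd : 0 ≤ d) : ∀ (lst : List Int) (t : List (Int × Int)),
    getARec lst d t = t ++ lst.zip (lst.drop d.toNat)
  | [], t => by
    rw [getARec]
    simp [hd]
  | e :: rest, t => by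
    rw [getARec]
    by_cases h : ((e :: rest).length : Int) ≤ d
    · rw [if_pos h]
      have hlen : (e :: rest).length ≤ d.toNat := by omega
      simp [List.drop_eq_nil_of_le hlen]
    · rw [if_neg h]
      have hlen : d.toNat < (e :: rest).length := by simp at h ⊢; omega
      have hget : PySem.List.pyGet? (e :: rest) d = some ((e :: rest)[d.toNat]'hlen) := by
        rw [PySem.List.pyGet?_of_nonneg _ hd]
        exact List.getElem?_eq_getElem hlen
      have hdrop : (e :: rest).drop d.toNat = (e :: rest)[d.toNat]'hlen :: rest.drop d.toNat := by
        rw [List.drop_eq_getElem_cons hlen, List.drop_succ_cons]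
      rw [hget, hdrop, List.zip_cons_cons]
      exact (getARec_eq d hd rest (t ++ [(e, (e :: rest)[d.toNat]'hlen)])).trans (by simp)

-- B's index loop computes the same zip when 0 ≤ d.
lemma alt_eq (list : List Int) (d : Int) (hd : 0 ≤ d) (t : List (Int × Int)) :
    (PySem.List.pyRange 0 ((list.length : Int) - d) 1).foldl
      (fun t i => t ++ [(PySem.List.pyGetD list i 0, PySem.List.pyGetD list (i + d) 0)]) t
    = t ++ list.zip (list.drop d.toNat) := by
  rw [PySem.List.foldl_append_singleton_eq_map, PySem.List.pyRange_one, List.map_map]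
  congr 1
  apply List.ext_getElem
  · simp [List.length_zip]; omega
  · intro k h1 h2
    have hlen : k < ((list.length : Int) - d).toNat := by simpa using h1
    have hklen : k < list.length := by omega
    have hkd : k + d.toNat < list.length := by omega
    simp only [List.getElem_map, List.getElem_range, Function.comp_apply, zero_add]
    have hc : (k : Int) + d = ((k + d.toNat : Nat) : Int) := by push_cast; omega
    rw [hc, PySem.List.pyGetD_natCast, PySem.List.pyGetD_natCast, List.getElem_zip]
    simp [hklen, hkd, List.getElem_drop]
    congr 1
    omega

-- ===== VERDICT (by name: the statement is the Claim_ definition above) =====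
theorem get_d_list_spec : Claim_equal_get_d_list := by
  intro list d tmp _ hpre
  unfold Spec_get_d_list get_d_list get_d_list_alt
  rw [getARec_eq d hpre, alt_eq list d hpre]
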